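-- pv_equiv track=rewrite | github.com/ZUENS2020/ISCTF | ecc_solution.py | pow_ext
-- ===== SOURCE A (Python) =====
-- def mul_ext(a, b, c, d, p):
--     """Multiply in F_p[i]/(i^2 - 326)"""
--     return ((a*c + 326*b*d) % p, (a*d + b*c) % p)
--
-- def pow_ext(a, b, n, p):
--     """Compute (a + bi)^n in F_{p^2}"""
--     result_a, result_b = 1, 0
--     base_a, base_b = a, b
--     n = int(n)
--     while n > 0:
--         if n % 2 == 1:
--             result_a, result_b = mul_ext(result_a, result_b, base_a, base_b, p)
--         base_a, base_b = mul_ext(base_a, base_b, base_a, base_b, p)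
--         n //= 2
--     return result_a, result_b
-- ===== SOURCE B (Python) =====
-- def mul_ext(a, b, c, d, p):
--     """Multiply in F_p[i]/(i^2 - 326)"""
--     return ((a*c + 326*b*d) % p, (a*d + b*c) % p)
--
-- def pow_ext(a, b, n, p):
--     """Compute (a + bi)^n in F_{p^2} by top-down recursive squaring"""
--     n = int(n)
--     if n <= 0:
--         return (1, 0)
--     ra, rb = pow_ext(a, b, n // 2, p)
--     sa, sb = mul_ext(ra, rb, ra, rb, p)
--     if n % 2 == 1:
--         return mul_ext(sa, sb, a, b, p)
--     return (sa, sb)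
-- ===== Notes on version B (the rewrite author's own statement) =====
-- stated objective: alternative
-- what changed: Replaces A's right-to-left iterative square-and-multiply loop with accumulator and running base by a top-down recursion on n//2 that squares the recursive result and multiplies by the original base on odd n.
import Mathlib
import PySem

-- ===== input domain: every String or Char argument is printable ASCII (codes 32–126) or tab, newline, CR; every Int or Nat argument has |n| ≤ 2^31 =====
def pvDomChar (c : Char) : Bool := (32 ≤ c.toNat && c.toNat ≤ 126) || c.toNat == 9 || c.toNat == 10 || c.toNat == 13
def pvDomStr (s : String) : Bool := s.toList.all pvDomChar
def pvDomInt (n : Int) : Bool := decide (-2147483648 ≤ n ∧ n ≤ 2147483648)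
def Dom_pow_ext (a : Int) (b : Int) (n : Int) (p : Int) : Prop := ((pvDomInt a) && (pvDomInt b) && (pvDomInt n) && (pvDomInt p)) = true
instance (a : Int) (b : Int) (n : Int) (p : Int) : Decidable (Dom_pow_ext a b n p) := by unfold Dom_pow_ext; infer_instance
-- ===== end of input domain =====

-- B replaces A's iterative right-to-left square-and-multiply accumulation by a top-down
-- recursion on n//2 (square the recursive result, multiply by the base when n is odd);
-- same cost, different decomposition.

-- ===== PORT A =====
def mul_ext (a b c d p : Int) : Int × Int :=
  (PySem.Int.mod (a*c + 326*b*d) p, PySem.Int.mod (a*d + b*c) p)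

def powLoopA (ra rb ba bb : Int) (n : Int) (p : Int) : Int × Int :=
  if h : 0 < n then
    let r' := if PySem.Int.mod n 2 = 1 then mul_ext ra rb ba bb p else (ra, rb)
    let b' := mul_ext ba bb ba bb p
    powLoopA r'.1 r'.2 b'.1 b'.2 (PySem.Int.floordiv n 2) p
  else (ra, rb)
termination_by n.toNat
decreasing_by
  have h2 : PySem.Int.floordiv n 2 = n / 2 := PySem.Int.floordiv_eq_ediv_of_pos (by norm_num)
  rw [h2]; omega

def pow_ext (a : Int) (b : Int) (n : Int) (p : Int) : Int × Int :=
  powLoopA 1 0 a b n p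

-- ===== PORT B =====
def pow_ext_alt (a : Int) (b : Int) (n : Int) (p : Int) : Int × Int :=
  if h : n ≤ 0 then (1, 0)
  else
    let r := pow_ext_alt a b (PySem.Int.floordiv n 2) p
    let s := mul_ext r.1 r.2 r.1 r.2 p
    if PySem.Int.mod n 2 = 1 then mul_ext s.1 s.2 a b p else s
termination_by n.toNat
decreasing_by
  have h2 : PySem.Int.floordiv n 2 = n / 2 := PySem.Int.floordiv_eq_ediv_of_pos (by norm_num)
  rw [h2]; omega

-- ===== PRECONDITION & SPEC =====
-- Pre_ excludes exactly the inputs where Python A raises ZeroDivisionError: p = 0 with n > 0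
-- (the loop body takes % p). A is total everywhere else.
def Pre_pow_ext (a : Int) (b : Int) (n : Int) (p : Int) : Prop := n ≤ 0 ∨ p ≠ 0
instance (a : Int) (b : Int) (n : Int) (p : Int) : Decidable (Pre_pow_ext a b n p) := by unfold Pre_pow_ext; infer_instance

def pvWitness_pow_ext : Int × Int × Int × Int := (2, 3, 10, 97)

def Spec_pow_ext (a : Int) (b : Int) (n : Int) (p : Int) (out : Int × Int) : Prop := out = pow_ext_alt a b n p
instance (a : Int) (b : Int) (n : Int) (p : Int) (out : Int × Int) : Decidable (Spec_pow_ext a b n p out) := by unfold Spec_pow_ext; infer_instance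

-- ===== CLAIM (what is proved, stated in full; the proofs are below) =====
def Claim_equal_pow_ext : Prop := ∀ (a : Int) (b : Int) (n : Int) (p : Int), Dom_pow_ext a b n p → Pre_pow_ext a b n p → Spec_pow_ext a b n p (pow_ext a b n p)

-- ===== LEMMAS AND PROOFS =====

-- abstract (un-reduced) multiplication and power in Z[i]/(i^2-326)
def mulZ (x y : Int × Int) : Int × Int := (x.1*y.1 + 326*x.2*y.2, x.1*y.2 + x.2*y.1)

def powZ (x : Int × Int) : Nat → Int × Int
  | 0 => (1, 0)
  | k+1 => mulZ (powZ x k) x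

def red (x : Int × Int) (p : Int) : Int × Int := (PySem.Int.mod x.1 p, PySem.Int.mod x.2 p)

def Cong (p : Int) (x y : Int × Int) : Prop := x.1 ≡ y.1 [ZMOD p] ∧ x.2 ≡ y.2 [ZMOD p]

lemma pymod_modeq (a p : Int) : PySem.Int.mod a p ≡ a [ZMOD p] := by
  rw [Int.modEq_iff_dvd]
  exact ⟨PySem.Int.floordiv a p, by have := PySem.Int.floordiv_mul_add_mod a p; linarith⟩

lemma pymod_congr {a b p : Int} (hp : p ≠ 0) (h : a ≡ b [ZMOD p]) :
    PySem.Int.mod a p = PySem.Int.mod b p := by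
  have hm : PySem.Int.mod a p ≡ PySem.Int.mod b p [ZMOD p] :=
    ((pymod_modeq a p).trans h).trans (pymod_modeq b p).symm
  have hd : p ∣ (PySem.Int.mod b p - PySem.Int.mod a p) := hm.dvd
  have hz : PySem.Int.mod b p - PySem.Int.mod a p = 0 := by
    rcases lt_or_gt_of_ne hp with hneg | hpos
    · refine Int.eq_zero_of_abs_lt_dvd ((Int.neg_dvd).mpr hd) ?_
      have h1 := PySem.Int.mod_neg_bounds (a := a) hneg
      have h2 := PySem.Int.mod_neg_bounds (a := b) hneg
      rw [abs_lt]; omega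
    · refine Int.eq_zero_of_abs_lt_dvd hd ?_
      have h1 := PySem.Int.mod_nonneg (a := a) hpos
      have h2 := PySem.Int.mod_lt (a := a) hpos
      have h3 := PySem.Int.mod_nonneg (a := b) hpos
      have h4 := PySem.Int.mod_lt (a := b) hpos
      rw [abs_lt]; omega
  omega

lemma cong_refl (p : Int) (x : Int × Int) : Cong p x x := ⟨Int.ModEq.refl _, Int.ModEq.refl _⟩

lemma red_cong (x : Int × Int) (p : Int) : Cong p (red x p) x :=
  ⟨pymod_modeq _ _, pymod_modeq _ _⟩

lemma red_congr {p : Int} (hp : p ≠ 0) {x y : Int × Int} (h : Cong p x y) :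
    red x p = red y p := by
  unfold red
  rw [pymod_congr hp h.1, pymod_congr hp h.2]

lemma mulZ_congr {p : Int} {x x' y y' : Int × Int} (h1 : Cong p x x') (h2 : Cong p y y') :
    Cong p (mulZ x y) (mulZ x' y') := by
  refine ⟨?_, (h1.1.mul h2.2).add (h1.2.mul h2.1)⟩
  show x.1*y.1 + 326*x.2*y.2 ≡ x'.1*y'.1 + 326*x'.2*y'.2 [ZMOD p]
  have h := (h1.1.mul h2.1).add ((Int.ModEq.refl 326).mul (h1.2.mul h2.2))
  simpa [mul_assoc] using h

lemma powZ_congr {p : Int} {x y : Int × Int} (h : Cong p x y) (k : Nat) :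
    Cong p (powZ x k) (powZ y k) := by
  induction k with
  | zero => exact cong_refl p (1, 0)
  | succ k ih => exact mulZ_congr ih h

lemma cong_trans {p : Int} {x y z : Int × Int} (h1 : Cong p x y) (h2 : Cong p y z) :
    Cong p x z := ⟨h1.1.trans h2.1, h1.2.trans h2.2⟩

lemma mulZ_comm (x y : Int × Int) : mulZ x y = mulZ y x := by
  refine Prod.ext ?_ ?_ <;> (simp only [mulZ]; ring)

lemma mulZ_assoc (x y z : Int × Int) : mulZ (mulZ x y) z = mulZ x (mulZ y z) := by
  refine Prod.ext ?_ ?_ <;> (simp only [mulZ]; ring)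

lemma mulZ_one_left (x : Int × Int) : mulZ (1, 0) x = x := by
  unfold mulZ; simp

lemma mulZ_one_right (x : Int × Int) : mulZ x (1, 0) = x := by
  rw [mulZ_comm, mulZ_one_left]

lemma powZ_add (x : Int × Int) (m n : Nat) : powZ x (m + n) = mulZ (powZ x m) (powZ x n) := by
  induction n with
  | zero => simp [powZ, mulZ_one_right]
  | succ n ih =>
      have : m + (n + 1) = (m + n) + 1 := by omega
      rw [this]
      show mulZ (powZ x (m + n)) x = mulZ (powZ x m) (mulZ (powZ x n) x)
      rw [ih, mulZ_assoc]

lemma powZ_sq (x : Int × Int) (k : Nat) : powZ (mulZ x x) k = powZ x (2 * k) := by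
  induction k with
  | zero => rfl
  | succ k ih =>
      show mulZ (powZ (mulZ x x) k) (mulZ x x) = powZ x (2 * (k + 1))
      rw [ih, show 2 * (k + 1) = 2 * k + 2 from by omega, powZ_add x (2 * k) 2]
      congr 1
      show mulZ x x = mulZ (mulZ (1, 0) x) x
      rw [mulZ_one_left]

lemma mul_ext_red (x y : Int × Int) (p : Int) :
    mul_ext x.1 x.2 y.1 y.2 p = red (mulZ x y) p := rfl

lemma powLoopA_eq {p : Int} (hp : p ≠ 0) :
    ∀ (k : Nat) (m : Int), 0 < m → m.toNat = k → ∀ (r base : Int × Int),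
      powLoopA r.1 r.2 base.1 base.2 m p = red (mulZ r (powZ base k)) p := by
  intro k
  induction k using Nat.strong_induction_on with
  | _ k ih =>
    intro m hm hk r base
    have hdiv : PySem.Int.floordiv m 2 = m / 2 := PySem.Int.floordiv_eq_ediv_of_pos (by norm_num)
    have hmod : PySem.Int.mod m 2 = m % 2 := PySem.Int.mod_eq_emod_of_pos (by norm_num)
    rw [powLoopA, dif_pos hm, hdiv, hmod]
    by_cases hhalf : m / 2 = 0
    · -- m = 1
      have hm1 : m = 1 := by omega
      have hk1 : k = 1 := by omega
      subst hm1
      rw [if_pos (by decide)]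
      rw [powLoopA, dif_neg (by norm_num)]
      rw [show ((mul_ext r.1 r.2 base.1 base.2 p).1, (mul_ext r.1 r.2 base.1 base.2 p).2)
            = mul_ext r.1 r.2 base.1 base.2 p from rfl]
      rw [mul_ext_red, hk1]
      show red (mulZ r base) p = red (mulZ r (powZ base 1)) p
      have : powZ base 1 = base := by
        show mulZ (1, 0) base = base
        exact mulZ_one_left base
      rw [this]
    · have hhpos : 0 < m / 2 := by omega
      have hk' : (m / 2).toNat < k := by omega
      have hrec := ih (m / 2).toNat hk' (m / 2) hhpos rfl
      by_cases hodd : m % 2 = 1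
      · rw [if_pos hodd]
        rw [hrec (mul_ext r.1 r.2 base.1 base.2 p) (mul_ext base.1 base.2 base.1 base.2 p)]
        rw [mul_ext_red r base, mul_ext_red base base]
        refine red_congr hp ?_
        have hc : Cong p (mulZ (red (mulZ r base) p) (powZ (red (mulZ base base) p) (m / 2).toNat))
            (mulZ (mulZ r base) (powZ (mulZ base base) (m / 2).toNat)) :=
          mulZ_congr (red_cong _ _) (powZ_congr (red_cong _ _) _)
        refine cong_trans hc ?_
        rw [powZ_sq, mulZ_assoc]
        have hk2 : k = 2 * (m / 2).toNat + 1 := by omega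
        rw [hk2]
        have : powZ base (2 * (m / 2).toNat + 1)
            = mulZ base (powZ base (2 * (m / 2).toNat)) := by
          show powZ base (2 * (m / 2).toNat + 1) = _
          rw [show (2 * (m / 2).toNat + 1) = (2 * (m / 2).toNat) + 1 from rfl]
          show mulZ (powZ base (2 * (m / 2).toNat)) base = _
          rw [mulZ_comm]
        rw [this]
        exact cong_refl _ _
      · rw [if_neg hodd]
        rw [show ((r.1, r.2).1) = r.1 from rfl]
        rw [hrec (r.1, r.2) (mul_ext base.1 base.2 base.1 base.2 p)]
        rw [mul_ext_red base base]
        refine red_congr hp ?_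
        have hc : Cong p (mulZ (r.1, r.2) (powZ (red (mulZ base base) p) (m / 2).toNat))
            (mulZ r (powZ (mulZ base base) (m / 2).toNat)) :=
          mulZ_congr (cong_refl _ _) (powZ_congr (red_cong _ _) _)
        refine cong_trans hc ?_
        rw [powZ_sq]
        have hk2 : k = 2 * (m / 2).toNat := by omega
        rw [hk2]
        exact cong_refl _ _

lemma pow_ext_alt_eq {p : Int} (hp : p ≠ 0) (a b : Int) :
    ∀ (k : Nat) (m : Int), 0 < m → m.toNat = k →
      pow_ext_alt a b m p = red (powZ (a, b) k) p := by
  intro k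
  induction k using Nat.strong_induction_on with
  | _ k ih =>
    intro m hm hk
    have hdiv : PySem.Int.floordiv m 2 = m / 2 := PySem.Int.floordiv_eq_ediv_of_pos (by norm_num)
    have hmod : PySem.Int.mod m 2 = m % 2 := PySem.Int.mod_eq_emod_of_pos (by norm_num)
    rw [pow_ext_alt, dif_neg (by omega), hdiv, hmod]
    by_cases hhalf : m / 2 = 0
    · have hm1 : m = 1 := by omega
      have hk1 : k = 1 := by omega
      subst hm1
      rw [show pow_ext_alt a b ((1:Int) / 2) p = (1, 0) from by
            rw [pow_ext_alt]; norm_num]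
      rw [if_pos (by decide), hk1]
      rw [mul_ext_red (1, 0) (1, 0), mulZ_one_left]
      rw [show mul_ext (red (1, 0) p).1 (red (1, 0) p).2 a b p
            = red (mulZ (red (1, 0) p) (a, b)) p from rfl]
      refine red_congr hp ?_
      refine cong_trans (mulZ_congr (red_cong _ _) (cong_refl _ _)) ?_
      rw [mulZ_one_left]
      have : powZ (a, b) 1 = (a, b) := by
        show mulZ (1, 0) (a, b) = (a, b)
        exact mulZ_one_left _
      rw [this]
      exact cong_refl _ _
    · have hhpos : 0 < m / 2 := by omega
      have hk' : (m / 2).toNat < k := by omega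
      have hrec := ih (m / 2).toNat hk' (m / 2) hhpos rfl
      rw [hrec]
      set r := red (powZ (a, b) (m / 2).toNat) p with hr
      show (if m % 2 = 1 then
              mul_ext (mul_ext r.1 r.2 r.1 r.2 p).1 (mul_ext r.1 r.2 r.1 r.2 p).2 a b p
            else mul_ext r.1 r.2 r.1 r.2 p) = red (powZ (a, b) k) p
      have hs : mul_ext r.1 r.2 r.1 r.2 p = red (mulZ r r) p := mul_ext_red r r p
      have hsq : red (mulZ r r) p = red (powZ (a, b) (2 * (m / 2).toNat)) p := by
        refine red_congr hp ?_
        refine cong_trans (mulZ_congr (red_cong _ _) (red_cong _ _)) ?_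
        rw [show 2 * (m / 2).toNat = (m / 2).toNat + (m / 2).toNat from by omega,
            powZ_add]
        exact cong_refl _ _
      by_cases hodd : m % 2 = 1
      · rw [if_pos hodd]
        rw [hs]
        rw [show mul_ext (red (mulZ r r) p).1 (red (mulZ r r) p).2 a b p
              = red (mulZ (red (mulZ r r) p) (a, b)) p from rfl]
        refine red_congr hp ?_
        refine cong_trans (mulZ_congr (red_cong _ _) (cong_refl _ _)) ?_
        refine cong_trans (mulZ_congr (mulZ_congr (red_cong _ _) (red_cong _ _)) (cong_refl _ _)) ?_
        rw [show 2 * (m / 2).toNat = (m / 2).toNat + (m / 2).toNat from by omega] at *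
        have hk2 : k = ((m / 2).toNat + (m / 2).toNat) + 1 := by omega
        rw [hk2]
        show Cong p (mulZ (mulZ (powZ (a,b) (m / 2).toNat) (powZ (a,b) (m / 2).toNat)) (a, b))
            (powZ (a, b) (((m / 2).toNat + (m / 2).toNat) + 1))
        rw [← powZ_add]
        exact cong_refl _ _
      · rw [if_neg hodd, hs, hsq]
        have hk2 : k = 2 * (m / 2).toNat := by omega
        rw [hk2]

-- ===== VERDICT (by name: the statement is the Claim_ definition above) =====
theorem pow_ext_spec : Claim_equal_pow_ext := by
  intro a b n p _ hpre
  unfold Spec_pow_ext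
  by_cases hn : 0 < n
  · have hp : p ≠ 0 := by
      rcases hpre with h | h
      · omega
      · exact h
    have hA := powLoopA_eq hp n.toNat n hn rfl (1, 0) (a, b)
    have hB := pow_ext_alt_eq hp a b n.toNat n hn rfl
    show powLoopA 1 0 a b n p = pow_ext_alt a b n p
    rw [show powLoopA 1 0 a b n p = powLoopA (1,0).1 (1,0).2 (a,b).1 (a,b).2 n p from rfl,
        hA, hB, mulZ_one_left]
  · show powLoopA 1 0 a b n p = pow_ext_alt a b n p
    rw [powLoopA, dif_neg hn, pow_ext_alt, dif_pos (by omega)]
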